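-- pv_equiv track=rewrite | github.com/spyysalo/string-db-tools | common.py | stringdb_unescape_text
-- ===== SOURCE A (Python) =====
-- from itertools import zip_longest
--
-- def stringdb_unescape_text(text):
--     """Unescape text field in database_documents.tsv format."""
--     unescaped = []
--     pair_iter = zip_longest(text, text[1:])
--     for char, next_ in pair_iter:
--         if char == '\\' and next_ == '\\':
--             # Double backslash -> single backslash
--             unescaped.append('\\')
--             next(pair_iter)
--         elif char == '\\' and next_ == 't':
--             # Backslash + t -> tab character
--             unescaped.append('\t')
--             next(pair_iter)
--         else:
--             unescaped.append(char)
--     return ''.join(unescaped)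
-- ===== SOURCE B (Python) =====
-- def stringdb_unescape_text(text):
--     """Unescape text field in database_documents.tsv format."""
--     out = []
--     pending = False  # True while an unconsumed backslash awaits its partner
--     for ch in text:
--         if pending:
--             if ch == '\\':
--                 out.append('\\')
--             elif ch == 't':
--                 out.append('\t')
--             else:
--                 out.append('\\')
--                 out.append(ch)
--             pending = False
--         elif ch == '\\':
--             pending = True
--         else:
--             out.append(ch)
--     if pending:
--         out.append('\\')
--     return ''.join(out)
-- ===== Notes on version B (the rewrite author's own statement) =====
-- stated objective: alternative
-- what changed: Replaces the zip_longest paired-iterator loop with explicit next() skipping by a single-pass state machine that carries a pending-backslash flag and never looks ahead.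
import Mathlib
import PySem

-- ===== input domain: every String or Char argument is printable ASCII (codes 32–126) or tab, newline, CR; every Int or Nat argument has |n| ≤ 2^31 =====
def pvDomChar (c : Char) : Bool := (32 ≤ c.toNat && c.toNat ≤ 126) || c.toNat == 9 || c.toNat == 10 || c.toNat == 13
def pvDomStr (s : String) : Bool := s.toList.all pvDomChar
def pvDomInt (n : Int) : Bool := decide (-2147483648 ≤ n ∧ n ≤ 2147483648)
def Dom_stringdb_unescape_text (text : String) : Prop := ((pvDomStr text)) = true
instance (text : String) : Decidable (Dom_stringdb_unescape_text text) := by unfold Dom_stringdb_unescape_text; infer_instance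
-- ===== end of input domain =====

-- B replaces A's paired-iterator-with-skip loop by a one-pass state machine carrying a pending-backslash flag (alternative decomposition, same cost).


-- ===== PORT A =====
-- the zip_longest(text, text[1:]) loop: each step sees (char, next_); a matched pair
-- consumes both characters (the next(pair_iter) call), the last pair has next_ = None
def unescPairs : List Char → List Char
  | [] => []
  | [c] => [c]                                    -- (c, None) pair: neither branch fires
  | c :: n :: rest' =>
    if c = '\\' && n = '\\' then '\\' :: unescPairs rest'
    else if c = '\\' && n = 't' then '\t' :: unescPairs rest'
    else c :: unescPairs (n :: rest')

def stringdb_unescape_text (text : String) : String :=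
  String.ofList (unescPairs text.toList)

-- ===== PORT B =====
-- one loop step of Source B: state = (output so far, pending-backslash flag)
def altStep (s : List Char × Bool) (ch : Char) : List Char × Bool :=
  if s.2 then
    (if ch = '\\' then s.1 ++ ['\\']
     else if ch = 't' then s.1 ++ ['\t']
     else s.1 ++ ['\\', ch], false)
  else if ch = '\\' then (s.1, true)
  else (s.1 ++ [ch], false)

def stringdb_unescape_text_alt (text : String) : String :=
  let r := text.toList.foldl altStep ([], false)
  String.ofList (if r.2 then r.1 ++ ['\\'] else r.1)

-- ===== PRECONDITION & SPEC =====
def Spec_stringdb_unescape_text (text : String) (out : String) : Prop := out = stringdb_unescape_text_alt text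
instance (text : String) (out : String) : Decidable (Spec_stringdb_unescape_text text out) := by unfold Spec_stringdb_unescape_text; infer_instance

-- ===== CLAIM (what is proved, stated in full; the proofs are below) =====
def Claim_equal_stringdb_unescape_text : Prop := ∀ (text : String), Dom_stringdb_unescape_text text → Spec_stringdb_unescape_text text (stringdb_unescape_text text)

-- ===== LEMMAS AND PROOFS =====

-- B's finishing step (flush a trailing pending backslash)
def altFinish (r : List Char × Bool) : List Char := if r.2 then r.1 ++ ['\\'] else r.1

theorem unescPairs_not_bs {c : Char} (h : c ≠ '\\') (rest : List Char) :
    unescPairs (c :: rest) = c :: unescPairs rest := by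
  cases rest with
  | nil => simp [unescPairs]
  | cons n rest' => simp [unescPairs, h]

-- main invariant: running B's fold from state (out, flag) produces out ++ A's result
-- on the remaining input (with a '\\' prepended when flag is set)
theorem altFold_invariant (cs : List Char) : ∀ out : List Char,
    altFinish (cs.foldl altStep (out, false)) = out ++ unescPairs cs ∧
    altFinish (cs.foldl altStep (out, true)) = out ++ unescPairs ('\\' :: cs) := by
  induction cs with
  | nil => intro out; simp [altFinish, unescPairs]
  | cons c cs ih =>
    intro out
    constructor
    · by_cases hc : c = '\\'
      · subst hc
        simpa [altStep] using (ih out).2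
      · rw [unescPairs_not_bs hc]
        simpa [altStep, hc] using (ih (out ++ [c])).1
    · by_cases hc : c = '\\'
      · subst hc
        have := (ih (out ++ ['\\'])).1
        simp [altStep] at this ⊢
        simp [unescPairs, this]  -- A's pair rule on the matched escape
      · by_cases ht : c = 't'
        · subst ht
          have := (ih (out ++ ['\t'])).1
          simp [altStep] at this ⊢
          simp [unescPairs, this]  -- A's pair rule on the matched escape
        · have := (ih (out ++ ['\\', c])).1
          simp [altStep, hc, ht] at this ⊢
          have h2 : unescPairs ('\\' :: c :: cs) = '\\' :: c :: unescPairs cs := by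
            simp [unescPairs, hc, ht, unescPairs_not_bs hc]
          simp [h2, this]

-- ===== VERDICT (by name: the statement is the Claim_ definition above) =====
theorem stringdb_unescape_text_spec : Claim_equal_stringdb_unescape_text := by
  intro text _
  unfold Spec_stringdb_unescape_text stringdb_unescape_text stringdb_unescape_text_alt
  have h := (altFold_invariant text.toList []).1
  simp [altFinish] at h
  rw [← h]
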